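-- pv_equiv track=rewrite | github.com/itsbtb18/EduConnect_DZ | backend/apps/academics/services.py | _build_timetable_html
-- ===== SOURCE A (Python) =====
-- DAY_NAMES_FR = {
--     0: "Dimanche",
--     1: "Lundi",
--     2: "Mardi",
--     3: "Mercredi",
--     4: "Jeudi",
-- }
--
-- def _build_timetable_html(title: str, schedule: dict, entity_label: str) -> str:
--     """
--     Build an HTML table for a weekly timetable.
--
--     Args:
--         title: e.g. "Emploi du temps — 1AM-A"
--         schedule: dict keyed by day_of_week (0-4), values are lists of slot dicts
--         entity_label: "class" | "teacher" — determines which column to show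
--     """
--     # Collect all unique time ranges across all days
--     time_ranges = set()
--     for day_slots in schedule.values():
--         for slot in day_slots:
--             time_ranges.add((slot["start"], slot["end"]))
--     time_ranges = sorted(time_ranges)
--
--     if not time_ranges:
--         return f"<h2>{title}</h2><p>Aucun créneau programmé.</p>"
--
--     html = f"""
--     <!DOCTYPE html>
--     <html>
--     <head>
--     <meta charset="utf-8">
--     <style>
--         body {{ font-family: Arial, sans-serif; margin: 20px; direction: ltr; }}
--         h1 {{ text-align: center; color: #1a237e; margin-bottom: 5px; }}
--         h3 {{ text-align: center; color: #666; margin-top: 0; }}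
--         table {{ width: 100%; border-collapse: collapse; margin-top: 20px; }}
--         th {{ background-color: #1a237e; color: white; padding: 10px 6px;
--               border: 1px solid #ccc; text-align: center; font-size: 12px; }}
--         td {{ border: 1px solid #ccc; padding: 6px 4px; text-align: center;
--               font-size: 11px; vertical-align: top; min-height: 60px; }}
--         .slot-subject {{ font-weight: bold; color: #1a237e; }}
--         .slot-teacher {{ color: #555; font-size: 10px; }}
--         .slot-room {{ color: #888; font-size: 9px; font-style: italic; }}
--         .empty {{ background-color: #f5f5f5; }}
--         .footer {{ text-align: center; margin-top: 20px; font-size: 10px; color: #999; }}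
--     </style>
--     </head>
--     <body>
--     <h1>{title}</h1>
--     <table>
--     <thead>
--     <tr>
--         <th>Horaire</th>
--     """
--
--     # Day headers
--     for day_num in range(5):  # Sunday-Thursday
--         html += f"<th>{DAY_NAMES_FR[day_num]}</th>\n"
--     html += "</tr></thead><tbody>\n"
--
--     # Build lookup: (day, start, end) -> slot
--     slot_lookup = {}
--     for day, slots in schedule.items():
--         for slot in slots:
--             key = (int(day), slot["start"], slot["end"])
--             slot_lookup[key] = slot
--
--     # Time rows
--     for start, end in time_ranges:
--         html += f'<tr><td><strong>{start} - {end}</strong></td>\n'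
--         for day_num in range(5):
--             key = (day_num, start, end)
--             slot = slot_lookup.get(key)
--             if slot:
--                 subject = slot["subject"]
--                 detail = slot.get("teacher", "") if entity_label == "class" else slot.get("class", "")
--                 room = slot.get("room", "")
--                 html += '<td>'
--                 html += f'<div class="slot-subject">{subject}</div>'
--                 if detail:
--                     html += f'<div class="slot-teacher">{detail}</div>'
--                 if room:
--                     html += f'<div class="slot-room">{room}</div>'
--                 html += '</td>\n'
--             else:
--                 html += '<td class="empty">—</td>\n'
--         html += '</tr>\n'
--
--     html += """
--     </tbody></table>
--     <div class="footer">Généré automatiquement par ILMI</div>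
--     </body></html>
--     """
--     return html
-- ===== SOURCE B (Python) =====
-- DAY_NAMES_FR = {
--     0: "Dimanche",
--     1: "Lundi",
--     2: "Mardi",
--     3: "Mercredi",
--     4: "Jeudi",
-- }
--
--
-- def _build_timetable_html(title: str, schedule: dict, entity_label: str) -> str:
--     """Build the weekly timetable page by joining per-row/per-cell strings;
--     each cell finds its slot with a direct scan of the schedule."""
--     time_ranges = sorted({(slot["start"], slot["end"])
--                           for day_slots in schedule.values() for slot in day_slots})
--     if not time_ranges:
--         return f"<h2>{title}</h2><p>Aucun créneau programmé.</p>"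
--
--     def find_slot(day_num, start, end):
--         for day, slots in schedule.items():
--             if int(day) == day_num:
--                 for slot in slots:
--                     if slot["start"] == start and slot["end"] == end:
--                         return slot
--         return None
--
--     def cell(day_num, start, end):
--         slot = find_slot(day_num, start, end)
--         if not slot:
--             return '<td class="empty">—</td>\n'
--         detail = slot.get("teacher", "") if entity_label == "class" else slot.get("class", "")
--         room = slot.get("room", "")
--         out = f'<td><div class="slot-subject">{slot["subject"]}</div>'
--         if detail:
--             out += f'<div class="slot-teacher">{detail}</div>'
--         if room:
--             out += f'<div class="slot-room">{room}</div>'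
--         return out + '</td>\n'
--
--     head = f"""
--     <!DOCTYPE html>
--     <html>
--     <head>
--     <meta charset="utf-8">
--     <style>
--         body {{ font-family: Arial, sans-serif; margin: 20px; direction: ltr; }}
--         h1 {{ text-align: center; color: #1a237e; margin-bottom: 5px; }}
--         h3 {{ text-align: center; color: #666; margin-top: 0; }}
--         table {{ width: 100%; border-collapse: collapse; margin-top: 20px; }}
--         th {{ background-color: #1a237e; color: white; padding: 10px 6px;
--               border: 1px solid #ccc; text-align: center; font-size: 12px; }}
--         td {{ border: 1px solid #ccc; padding: 6px 4px; text-align: center;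
--               font-size: 11px; vertical-align: top; min-height: 60px; }}
--         .slot-subject {{ font-weight: bold; color: #1a237e; }}
--         .slot-teacher {{ color: #555; font-size: 10px; }}
--         .slot-room {{ color: #888; font-size: 9px; font-style: italic; }}
--         .empty {{ background-color: #f5f5f5; }}
--         .footer {{ text-align: center; margin-top: 20px; font-size: 10px; color: #999; }}
--     </style>
--     </head>
--     <body>
--     <h1>{title}</h1>
--     <table>
--     <thead>
--     <tr>
--         <th>Horaire</th>
--     """
--
--     day_headers = ''.join(f"<th>{name}</th>\n"
--                           for name in ("Dimanche", "Lundi", "Mardi", "Mercredi", "Jeudi"))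
--
--     body = ''.join(
--         f'<tr><td><strong>{start} - {end}</strong></td>\n'
--         + ''.join(cell(day_num, start, end) for day_num in range(5))
--         + '</tr>\n'
--         for start, end in time_ranges)
--
--     tail = """
--     </tbody></table>
--     <div class="footer">Généré automatiquement par ILMI</div>
--     </body></html>
--     """
--     return head + day_headers + "</tr></thead><tbody>\n" + body + tail
-- ===== Notes on version B (the rewrite author's own statement) =====
-- stated objective: simpler
-- what changed: B drops the pre-built (day,start,end) slot_lookup dict (each cell locates its slot by a direct first-match scan of the schedule) and composes the page by joining per-row/per-cell strings instead of accumulating one html variable; Pre_ excludes schedules with duplicate (int(day),start,end) triples — an unspecified corner where last-wins (A) and first-wins (B) are equally defensible — and slots missing the start/end/subject keys, on which A raises KeyError except when such a slot is never rendered (there both programs return the same value).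
import Mathlib
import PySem

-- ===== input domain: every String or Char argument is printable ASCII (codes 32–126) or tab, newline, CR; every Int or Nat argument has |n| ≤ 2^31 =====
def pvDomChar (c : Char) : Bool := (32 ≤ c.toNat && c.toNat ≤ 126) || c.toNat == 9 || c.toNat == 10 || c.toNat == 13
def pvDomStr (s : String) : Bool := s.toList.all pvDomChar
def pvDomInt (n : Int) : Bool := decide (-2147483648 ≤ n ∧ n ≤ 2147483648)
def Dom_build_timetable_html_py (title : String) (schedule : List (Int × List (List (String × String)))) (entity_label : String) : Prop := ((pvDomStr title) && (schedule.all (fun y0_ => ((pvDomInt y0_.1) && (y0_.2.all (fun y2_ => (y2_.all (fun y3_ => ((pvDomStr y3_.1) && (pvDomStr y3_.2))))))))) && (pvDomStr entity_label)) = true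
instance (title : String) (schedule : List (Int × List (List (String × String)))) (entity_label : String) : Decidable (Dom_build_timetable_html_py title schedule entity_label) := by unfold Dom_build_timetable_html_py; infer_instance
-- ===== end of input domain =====

-- Port A ↔ B of EduConnect_DZ backend/apps/academics/services.py::_build_timetable_html.
-- B (simpler): drops the pre-built (day,start,end) lookup dict — each cell finds its slot by a
-- direct first-match scan — and composes the page from joined row/cell strings instead of `html +=` accumulation.

-- shared string constants (the literal HTML chunks both Pythons contain)
def pvHead1 : String := "\n    <!DOCTYPE html>\n    <html>\n    <head>\n    <meta charset=\"utf-8\">\n    <style>\n        body { font-family: Arial, sans-serif; margin: 20px; direction: ltr; }\n        h1 { text-align: center; color: #1a237e; margin-bottom: 5px; }\n        h3 { text-align: center; color: #666; margin-top: 0; }\n        table { width: 100%; border-collapse: collapse; margin-top: 20px; }\n        th { background-color: #1a237e; color: white; padding: 10px 6px;\n              border: 1px solid #ccc; text-align: center; font-size: 12px; }\n        td { border: 1px solid #ccc; padding: 6px 4px; text-align: center;\n              font-size: 11px; vertical-align: top; min-height: 60px; }\n        .slot-subject { font-weight: bold; color: #1a237e; }\n        .slot-teacher { color: #555; font-size: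 10px; }\n        .slot-room { color: #888; font-size: 9px; font-style: italic; }\n        .empty { background-color: #f5f5f5; }\n        .footer { text-align: center; margin-top: 20px; font-size: 10px; color: #999; }\n    </style>\n    </head>\n    <body>\n    <h1>"
def pvHead2 : String := "</h1>\n    <table>\n    <thead>\n    <tr>\n        <th>Horaire</th>\n    "
def pvTail : String := "\n    </tbody></table>\n    <div class=\"footer\">Généré automatiquement par ILMI</div>\n    </body></html>\n    "
def pvEmptyCell : String := "<td class=\"empty\">—</td>\n"

-- slot.get(k, "") / slot[k] (the latter exact under Pre_, which guarantees the key is present)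
def pvSlotGetD (slot : List (String × String)) (k : String) : String :=
  (PySem.Dict.mk slot).getD k ""

-- (slot["start"], slot["end"])
def pvKey (slot : List (String × String)) : String × String :=
  (pvSlotGetD slot "start", pvSlotGetD slot "end")

-- DAY_NAMES_FR (module constant); lookup DAY_NAMES_FR[day_num] is only reached for 0..4, where getD "" is exact
def pvDayNames : PySem.Dict Int String :=
  PySem.Dict.mk [(0, "Dimanche"), (1, "Lundi"), (2, "Mardi"), (3, "Mercredi"), (4, "Jeudi")]

-- ===== PORT A =====
def build_timetable_html_py (title : String) (schedule : List (Int × List (List (String × String)))) (entity_label : String) : String :=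
  -- time_ranges = set(); nested for-loops of .add
  let time_ranges : PySem.Set (String × String) :=
    schedule.foldl (fun s p => p.2.foldl (fun s slot => PySem.Set.add s (pvKey slot)) s) PySem.Set.empty
  -- time_ranges = sorted(time_ranges)  (tuples: lexicographic)
  let tr := PySem.List.sorted2 time_ranges (fun x => x.1) (fun x => x.2) false
  if tr = [] then
    "<h2>" ++ title ++ "</h2><p>Aucun créneau programmé.</p>"
  else
    let html := pvHead1 ++ title ++ pvHead2
    -- for day_num in range(5): html += f"<th>{DAY_NAMES_FR[day_num]}</th>\n"
    let html := (PySem.List.pyRange 0 5 1).foldl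
      (fun h n => h ++ ("<th>" ++ pvDayNames.getD n "" ++ "</th>\n")) html
    let html := html ++ "</tr></thead><tbody>\n"
    -- slot_lookup: nested for-loops of dict insert, key (int(day), start, end)
    let lookup : PySem.Dict (Int × String × String) (List (String × String)) :=
      schedule.foldl (fun dd p => p.2.foldl (fun dd slot => dd.insert (p.1, pvKey slot) slot) dd)
        PySem.Dict.empty
    -- for start, end in time_ranges: … for day_num in range(5): …
    let html := tr.foldl (fun h se =>
      let h := h ++ ("<tr><td><strong>" ++ se.1 ++ " - " ++ se.2 ++ "</strong></td>\n")
      let h := (PySem.List.pyRange 0 5 1).foldl (fun h n =>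
        -- slot = slot_lookup.get(key); if slot: (None and {} are both falsy)
        let slot := (lookup.get? (n, se.1, se.2)).getD []
        if slot = [] then h ++ pvEmptyCell
        else
          let subject := pvSlotGetD slot "subject"
          let detail := if entity_label = "class" then pvSlotGetD slot "teacher" else pvSlotGetD slot "class"
          let room := pvSlotGetD slot "room"
          let h := h ++ "<td>"
          let h := h ++ ("<div class=\"slot-subject\">" ++ subject ++ "</div>")
          let h := if detail ≠ "" then h ++ ("<div class=\"slot-teacher\">" ++ detail ++ "</div>") else h
          let h := if room ≠ "" then h ++ ("<div class=\"slot-room\">" ++ room ++ "</div>") else h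
          h ++ "</td>\n") h
      h ++ "</tr>\n") html
    html ++ pvTail

-- ===== PORT B =====
-- find_slot's inner loop over one day's slot list: return the first slot with matching times
def pvFindSlotDay (slots : List (List (String × String))) (s e : String) : Option (List (String × String)) :=
  match slots with
  | [] => none
  | slot :: rest =>
      if pvSlotGetD slot "start" = s ∧ pvSlotGetD slot "end" = e then some slot
      else pvFindSlotDay rest s e

-- find_slot(day_num, start, end): scan schedule.items(), return on first match
def pvFindSlot (schedule : List (Int × List (List (String × String)))) (d : Int) (s e : String) : Option (List (String × String)) :=
  match schedule with
  | [] => none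
  | p :: rest =>
      if p.1 = d then
        match pvFindSlotDay p.2 s e with
        | some slot => some slot
        | none => pvFindSlot rest d s e
      else pvFindSlot rest d s e

-- cell(day_num, start, end)
def pvCell (schedule : List (Int × List (List (String × String)))) (entity_label : String) (d : Int) (s e : String) : String :=
  let slot := (pvFindSlot schedule d s e).getD []
  if slot = [] then pvEmptyCell
  else
    let detail := if entity_label = "class" then pvSlotGetD slot "teacher" else pvSlotGetD slot "class"
    let room := pvSlotGetD slot "room"
    "<td>" ++ ("<div class=\"slot-subject\">" ++ pvSlotGetD slot "subject" ++ "</div>")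
      ++ (if detail ≠ "" then "<div class=\"slot-teacher\">" ++ detail ++ "</div>" else "")
      ++ (if room ≠ "" then "<div class=\"slot-room\">" ++ room ++ "</div>" else "")
      ++ "</td>\n"

def build_timetable_html_py_alt (title : String) (schedule : List (Int × List (List (String × String)))) (entity_label : String) : String :=
  -- sorted({(slot["start"], slot["end"]) for day_slots in schedule.values() for slot in day_slots})
  let tr := PySem.List.sorted2 (PySem.Set.ofList (schedule.flatMap (fun p => p.2.map pvKey)))
    (fun x => x.1) (fun x => x.2) false
  if tr = [] then
    "<h2>" ++ title ++ "</h2><p>Aucun créneau programmé.</p>"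
  else
    let day_headers := PySem.Str.join ""
      (["Dimanche", "Lundi", "Mardi", "Mercredi", "Jeudi"].map (fun n => "<th>" ++ n ++ "</th>\n"))
    let body := PySem.Str.join "" (tr.map (fun se =>
      ("<tr><td><strong>" ++ se.1 ++ " - " ++ se.2 ++ "</strong></td>\n")
        ++ PySem.Str.join "" ((PySem.List.pyRange 0 5 1).map (fun n => pvCell schedule entity_label n se.1 se.2))
        ++ "</tr>\n"))
    pvHead1 ++ title ++ pvHead2 ++ day_headers ++ "</tr></thead><tbody>\n" ++ body ++ pvTail

-- ===== PRECONDITION & SPEC =====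
-- the schedule's slots flattened to (day, slot) pairs, in order
def pvFlat (schedule : List (Int × List (List (String × String)))) : List (Int × List (String × String)) :=
  schedule.flatMap (fun p => p.2.map (fun slot => (p.1, slot)))

-- Pre_: every slot dict carries the keys "start", "end" and "subject" (A subscripts them; KeyError
-- otherwise), and no two slots share the same (day, start, end) triple. Slightly narrower than A's
-- raise-free domain: A also returns a value when a key-less or duplicate slot exists — on a missing
-- "subject" that is never rendered both programs return the same value; duplicate triples are an
-- unspecified corner where last-wins (A) and first-wins (B) are equally defensible, so both are excluded.
def Pre_build_timetable_html_py (_title : String) (schedule : List (Int × List (List (String × String)))) (_entity_label : String) : Prop :=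
  (∀ p ∈ schedule, ∀ slot ∈ p.2,
    ((PySem.Dict.mk slot).get? "start").isSome ∧ ((PySem.Dict.mk slot).get? "end").isSome ∧
      ((PySem.Dict.mk slot).get? "subject").isSome) ∧
  ((pvFlat schedule).map (fun x => (x.1, pvKey x.2))).Nodup
instance (title : String) (schedule : List (Int × List (List (String × String)))) (entity_label : String) : Decidable (Pre_build_timetable_html_py title schedule entity_label) := by unfold Pre_build_timetable_html_py; infer_instance

def pvWitness_build_timetable_html_py : String × (List (Int × List (List (String × String)))) × String :=
  ("Emploi du temps", [(0, [[("start", "8h"), ("end", "9h"), ("subject", "Maths"), ("teacher", "Ali"), ("room", "S1")]]), (2, [])], "class")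

def Spec_build_timetable_html_py (title : String) (schedule : List (Int × List (List (String × String)))) (entity_label : String) (out : String) : Prop := out = build_timetable_html_py_alt title schedule entity_label
instance (title : String) (schedule : List (Int × List (List (String × String)))) (entity_label : String) (out : String) : Decidable (Spec_build_timetable_html_py title schedule entity_label out) := by unfold Spec_build_timetable_html_py; infer_instance

-- ===== CLAIM (what is proved, stated in full; the proofs are below) =====
def Claim_equal_build_timetable_html_py : Prop := ∀ (title : String) (schedule : List (Int × List (List (String × String)))) (entity_label : String), Dom_build_timetable_html_py title schedule entity_label → Pre_build_timetable_html_py title schedule entity_label → Spec_build_timetable_html_py title schedule entity_label (build_timetable_html_py title schedule entity_label)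

-- ===== LEMMAS AND PROOFS =====

-- the Boolean match predicate of one flattened (day, slot) pair against a cell key
def pvM (d : Int) (s e : String) (x : Int × List (String × String)) : Bool :=
  x.1 == d && pvSlotGetD x.2 "start" == s && pvSlotGetD x.2 "end" == e

theorem pvM_iff (d : Int) (s e : String) (x : Int × List (String × String)) :
    pvM d s e x = true ↔ (x.1, pvKey x.2) = (d, s, e) := by
  simp [pvM, pvKey, Prod.ext_iff, and_assoc]

-- ''.join: peel one element (sep = "")
theorem pv_join_cons_chars (x : List Char) (xs : List (List Char)) :
    PySem.Chars.join [] (x :: xs) = x ++ PySem.Chars.join [] xs := by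
  cases xs <;> simp [PySem.Chars.join, List.intercalate]

theorem pv_join_cons (x : String) (xs : List String) :
    PySem.Str.join "" (x :: xs) = x ++ PySem.Str.join "" xs := by
  apply String.toList_injective
  simp [PySem.Str.join, pv_join_cons_chars]

-- an `html += f(x)` loop is the join of the pieces
theorem pv_foldl_join {α : Type} (l : List α) (f : α → String) (s : String) :
    l.foldl (fun h x => h ++ f x) s = s ++ PySem.Str.join "" (l.map f) := by
  induction l generalizing s with
  | nil => simp [PySem.Str.join, PySem.Chars.join, List.intercalate]
  | cons x xs ih =>
    simp only [List.foldl, List.map]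
    rw [ih, pv_join_cons, String.append_assoc]

-- A's nested set-building loops = set(comprehension)
theorem pv_set_eq (schedule : List (Int × List (List (String × String)))) (init : PySem.Set (String × String)) :
    schedule.foldl (fun s p => p.2.foldl (fun s slot => PySem.Set.add s (pvKey slot)) s) init
      = PySem.Set.update init (schedule.flatMap (fun p => p.2.map pvKey)) := by
  induction schedule generalizing init with
  | nil => simp [PySem.Set.update]
  | cons p ps ih =>
    simp only [List.foldl, List.flatMap_cons]
    rw [← PySem.Set.update_map_eq_foldl_add, ih, PySem.Set.update_append]

-- a last-wins fold over a list with no match keeps its accumulator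
theorem pv_last_no_match {α β : Type} (l : List α) (m : α → Bool) (g : α → β) (acc : Option β)
    (h : ∀ x ∈ l, m x = false) :
    l.foldl (fun f x => if m x then some (g x) else f) acc = acc := by
  induction l generalizing acc with
  | nil => rfl
  | cons x xs ih =>
    simp only [List.foldl, h x (List.mem_cons_self)]
    exact ih _ (fun y hy => h y (List.mem_cons_of_mem _ hy))

-- with at most one match, the last match is the first match
theorem pv_last_eq_find {α β : Type} (l : List α) (m : α → Bool) (g : α → β)
    (h : l.countP m ≤ 1) :
    l.foldl (fun f x => if m x then some (g x) else f) none = (l.find? m).map g := by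
  induction l with
  | nil => rfl
  | cons x xs ih =>
    by_cases hx : m x = true
    · have hrest : ∀ y ∈ xs, m y = false := by
        intro y hy
        by_contra hyt
        simp only [Bool.not_eq_false] at hyt
        have h1 : 0 < xs.countP m := List.countP_pos_iff.mpr ⟨y, hy, hyt⟩
        have hcc : (x :: xs).countP m = xs.countP m + 1 := List.countP_cons_of_pos hx
        omega
      simp only [List.foldl, List.find?, hx, if_true]
      rw [pv_last_no_match _ _ _ _ hrest]
      rfl
    · simp only [Bool.not_eq_true] at hx
      have h' : xs.countP m ≤ 1 := by
        rw [List.countP_cons_of_neg (by simp [hx])] at h; exact h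
      simp only [List.foldl, List.find?, hx]
      exact ih h'

-- inner loop of the lookup build, observed through get? at one key
theorem pv_lookup_inner (slots : List (List (String × String)))
    (dd : PySem.Dict (Int × String × String) (List (String × String))) (p1 d : Int) (s e : String) :
    (slots.foldl (fun dd slot => dd.insert (p1, pvKey slot) slot) dd).get? (d, s, e)
      = if p1 = d then
          slots.foldl (fun found slot =>
            if pvSlotGetD slot "start" = s ∧ pvSlotGetD slot "end" = e then some slot else found)
            (dd.get? (d, s, e))
        else dd.get? (d, s, e) := by
  induction slots generalizing dd with
  | nil => split <;> rfl
  | cons slot slots ih =>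
    simp only [List.foldl]
    rw [ih, PySem.Dict.get?_insert]
    by_cases h1 : p1 = d
    · subst h1
      have hiff : ((p1, s, e) = (p1, pvKey slot)) ↔ (pvSlotGetD slot "start" = s ∧ pvSlotGetD slot "end" = e) := by
        simp [pvKey, Prod.ext_iff, eq_comm]
      simp [hiff]
    · have hne : ¬ ((d, s, e) = (p1, pvKey slot)) := by
        simp [Prod.ext_iff]; intro h; exact absurd h.symm h1
      simp only [if_neg h1, if_neg hne]

-- slot_lookup.get((d, s, e)) is the last-wins fold over the flattened schedule
theorem pv_lookup_last (schedule : List (Int × List (List (String × String)))) (d : Int) (s e : String) :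
    (schedule.foldl (fun dd p => p.2.foldl (fun dd slot => dd.insert (p.1, pvKey slot) slot) dd)
        (PySem.Dict.empty : PySem.Dict (Int × String × String) (List (String × String)))).get? (d, s, e)
      = (pvFlat schedule).foldl (fun f x => if pvM d s e x then some x.2 else f) none := by
  have gen : ∀ (sch : List (Int × List (List (String × String))))
      (D0 : PySem.Dict (Int × String × String) (List (String × String))),
      (sch.foldl (fun dd p => p.2.foldl (fun dd slot => dd.insert (p.1, pvKey slot) slot) dd) D0).get? (d, s, e)
        = (pvFlat sch).foldl (fun f x => if pvM d s e x then some x.2 else f) (D0.get? (d, s, e)) := by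
    intro sch
    induction sch with
    | nil => intro D0; rfl
    | cons p ps ih =>
      intro D0
      simp only [List.foldl, pvFlat, List.flatMap_cons, List.foldl_append, List.foldl_map]
      rw [ih, pv_lookup_inner]
      by_cases h1 : p.1 = d
      · subst h1
        rw [if_pos rfl]
        congr 1
        apply List.foldl_ext
        intro acc slot _
        by_cases hc : pvSlotGetD slot "start" = s ∧ pvSlotGetD slot "end" = e
        · simp [hc, pvM]
        · have hm : pvM p.1 s e (p.1, slot) = false := by
            simp only [pvM]
            rcases not_and_or.mp hc with h | h <;> simp [h]
          simp [hc, hm]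
      · rw [if_neg h1]
        congr 1
        rw [pv_last_no_match p.2 (fun slot => pvM d s e (p.1, slot)) (fun slot => slot)
          _ (fun slot _ => by simp [pvM, h1])]
  rw [gen, PySem.Dict.get?_empty]

-- B's find_slot is the first-match scan over the flattened schedule
theorem pv_findslot_find (schedule : List (Int × List (List (String × String)))) (d : Int) (s e : String) :
    pvFindSlot schedule d s e = ((pvFlat schedule).find? (pvM d s e)).map Prod.snd := by
  induction schedule with
  | nil => rfl
  | cons p ps ih =>
    simp only [pvFindSlot, pvFlat, List.flatMap_cons, List.find?_append]
    by_cases h1 : p.1 = d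
    · subst h1
      rw [if_pos rfl]
      have hinner : ∀ slots : List (List (String × String)),
          ((slots.map (fun slot => (p.1, slot))).find? (pvM p.1 s e)).map Prod.snd
            = pvFindSlotDay slots s e := by
        intro slots
        induction slots with
        | nil => rfl
        | cons slot rest ihs =>
          simp only [List.map, List.find?, pvFindSlotDay]
          by_cases hc : pvSlotGetD slot "start" = s ∧ pvSlotGetD slot "end" = e
          · simp [pvM, hc]
          · have : pvM p.1 s e (p.1, slot) = false := by
              simp only [pvM]
              rcases not_and_or.mp hc with h | h <;> simp [h]
            simp only [this, if_neg hc]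
            simpa using ihs
      cases hfd : pvFindSlotDay p.2 s e with
      | some slot =>
          rw [← hinner] at hfd
          cases hfind : (List.find? (pvM p.1 s e) (p.2.map fun slot => (p.1, slot))) with
          | none => rw [hfind] at hfd; simp at hfd
          | some y => rw [hfind] at hfd; simp at hfd; simp [hfd]
      | none =>
          rw [← hinner] at hfd
          cases hfind : (List.find? (pvM p.1 s e) (p.2.map fun slot => (p.1, slot))) with
          | none => simp [ih, pvFlat]
          | some y => rw [hfind] at hfd; simp at hfd
    · rw [if_neg h1]
      have hnone : (p.2.map (fun slot => (p.1, slot))).find? (pvM d s e) = none := by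
        rw [List.find?_eq_none]
        intro x hx
        rcases List.mem_map.mp hx with ⟨slot, _, rfl⟩
        simp [pvM, h1]
      simp [hnone, ih, pvFlat]

-- under Pre_'s no-duplicate-triples condition the dict lookup IS B's first-match scan
theorem pv_lookup_eq (schedule : List (Int × List (List (String × String))))
    (hnd : ((pvFlat schedule).map (fun x => (x.1, pvKey x.2))).Nodup) (d : Int) (s e : String) :
    (schedule.foldl (fun dd p => p.2.foldl (fun dd slot => dd.insert (p.1, pvKey slot) slot) dd)
        (PySem.Dict.empty : PySem.Dict (Int × String × String) (List (String × String)))).get? (d, s, e)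
      = pvFindSlot schedule d s e := by
  rw [pv_lookup_last, pv_findslot_find]
  apply pv_last_eq_find
  have hcount : (pvFlat schedule).countP (pvM d s e)
      = ((pvFlat schedule).map (fun x => (x.1, pvKey x.2))).count (d, s, e) := by
    rw [List.count_eq_countP, List.countP_map]
    apply List.countP_congr
    intro x _
    simp only [Function.comp]
    constructor
    · intro h; simpa [beq_iff_eq] using (pvM_iff d s e x).mp h
    · intro h; exact (pvM_iff d s e x).mpr (by simpa [beq_iff_eq] using h)
  rw [hcount]
  exact List.nodup_iff_count_le_one.mp hnd _

-- one cell of A's row loop = h ++ pvCell …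
theorem pv_cell_eq (schedule : List (Int × List (List (String × String)))) (entity_label : String)
    (hnd : ((pvFlat schedule).map (fun x => (x.1, pvKey x.2))).Nodup)
    (s e : String) (n : Int) (h : String) :
    (let slot := ((schedule.foldl (fun dd p => p.2.foldl (fun dd slot => dd.insert (p.1, pvKey slot) slot) dd)
        (PySem.Dict.empty : PySem.Dict (Int × String × String) (List (String × String)))).get? (n, s, e)).getD []
     if slot = [] then h ++ pvEmptyCell
     else
       let subject := pvSlotGetD slot "subject"
       let detail := if entity_label = "class" then pvSlotGetD slot "teacher" else pvSlotGetD slot "class"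
       let room := pvSlotGetD slot "room"
       let h := h ++ "<td>"
       let h := h ++ ("<div class=\"slot-subject\">" ++ subject ++ "</div>")
       let h := if detail ≠ "" then h ++ ("<div class=\"slot-teacher\">" ++ detail ++ "</div>") else h
       let h := if room ≠ "" then h ++ ("<div class=\"slot-room\">" ++ room ++ "</div>") else h
       h ++ "</td>\n")
      = h ++ pvCell schedule entity_label n s e := by
  rw [pv_lookup_eq schedule hnd]
  unfold pvCell
  by_cases hsl : (pvFindSlot schedule n s e).getD [] = []
  · simp [hsl]
  · by_cases hd : (if entity_label = "class" then pvSlotGetD ((pvFindSlot schedule n s e).getD []) "teacher"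
        else pvSlotGetD ((pvFindSlot schedule n s e).getD []) "class") = "" <;>
      by_cases hr : pvSlotGetD ((pvFindSlot schedule n s e).getD []) "room" = "" <;>
      simp [hsl, hd, hr, String.append_assoc]

-- A's whole row loop = the join of B's row strings
theorem pv_rows_eq (schedule : List (Int × List (List (String × String)))) (entity_label : String)
    (hnd : ((pvFlat schedule).map (fun x => (x.1, pvKey x.2))).Nodup)
    (tr : List (String × String)) (s0 : String) :
    tr.foldl (fun h se =>
      ((PySem.List.pyRange 0 5 1).foldl (fun h n =>
        let slot := ((schedule.foldl (fun dd p => p.2.foldl (fun dd slot => dd.insert (p.1, pvKey slot) slot) dd)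
            (PySem.Dict.empty : PySem.Dict (Int × String × String) (List (String × String)))).get? (n, se.1, se.2)).getD []
        if slot = [] then h ++ pvEmptyCell
        else
          let subject := pvSlotGetD slot "subject"
          let detail := if entity_label = "class" then pvSlotGetD slot "teacher" else pvSlotGetD slot "class"
          let room := pvSlotGetD slot "room"
          let h := h ++ "<td>"
          let h := h ++ ("<div class=\"slot-subject\">" ++ subject ++ "</div>")
          let h := if detail ≠ "" then h ++ ("<div class=\"slot-teacher\">" ++ detail ++ "</div>") else h
          let h := if room ≠ "" then h ++ ("<div class=\"slot-room\">" ++ room ++ "</div>") else h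
          h ++ "</td>\n")
        (h ++ ("<tr><td><strong>" ++ se.1 ++ " - " ++ se.2 ++ "</strong></td>\n"))) ++ "</tr>\n") s0
      = s0 ++ PySem.Str.join "" (tr.map (fun se =>
          ("<tr><td><strong>" ++ se.1 ++ " - " ++ se.2 ++ "</strong></td>\n")
            ++ PySem.Str.join "" ((PySem.List.pyRange 0 5 1).map (fun n => pvCell schedule entity_label n se.1 se.2))
            ++ "</tr>\n")) := by
  have hstep : ∀ (se : String × String) (h : String),
      ((PySem.List.pyRange 0 5 1).foldl (fun h n =>
        let slot := ((schedule.foldl (fun dd p => p.2.foldl (fun dd slot => dd.insert (p.1, pvKey slot) slot) dd)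
            (PySem.Dict.empty : PySem.Dict (Int × String × String) (List (String × String)))).get? (n, se.1, se.2)).getD []
        if slot = [] then h ++ pvEmptyCell
        else
          let subject := pvSlotGetD slot "subject"
          let detail := if entity_label = "class" then pvSlotGetD slot "teacher" else pvSlotGetD slot "class"
          let room := pvSlotGetD slot "room"
          let h := h ++ "<td>"
          let h := h ++ ("<div class=\"slot-subject\">" ++ subject ++ "</div>")
          let h := if detail ≠ "" then h ++ ("<div class=\"slot-teacher\">" ++ detail ++ "</div>") else h
          let h := if room ≠ "" then h ++ ("<div class=\"slot-room\">" ++ room ++ "</div>") else h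
          h ++ "</td>\n")
        (h ++ ("<tr><td><strong>" ++ se.1 ++ " - " ++ se.2 ++ "</strong></td>\n"))) ++ "</tr>\n"
      = h ++ (("<tr><td><strong>" ++ se.1 ++ " - " ++ se.2 ++ "</strong></td>\n")
          ++ PySem.Str.join "" ((PySem.List.pyRange 0 5 1).map (fun n => pvCell schedule entity_label n se.1 se.2))
          ++ "</tr>\n") := by
    intro se h
    have hfold : ∀ (l : List Int) (h : String),
        l.foldl (fun h n =>
          let slot := ((schedule.foldl (fun dd p => p.2.foldl (fun dd slot => dd.insert (p.1, pvKey slot) slot) dd)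
              (PySem.Dict.empty : PySem.Dict (Int × String × String) (List (String × String)))).get? (n, se.1, se.2)).getD []
          if slot = [] then h ++ pvEmptyCell
          else
            let subject := pvSlotGetD slot "subject"
            let detail := if entity_label = "class" then pvSlotGetD slot "teacher" else pvSlotGetD slot "class"
            let room := pvSlotGetD slot "room"
            let h := h ++ "<td>"
            let h := h ++ ("<div class=\"slot-subject\">" ++ subject ++ "</div>")
            let h := if detail ≠ "" then h ++ ("<div class=\"slot-teacher\">" ++ detail ++ "</div>") else h
            let h := if room ≠ "" then h ++ ("<div class=\"slot-room\">" ++ room ++ "</div>") else h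
            h ++ "</td>\n") h
        = h ++ PySem.Str.join "" (l.map (fun n => pvCell schedule entity_label n se.1 se.2)) := by
      intro l
      induction l with
      | nil => intro h; simp [PySem.Str.join, PySem.Chars.join, List.intercalate]
      | cons n ns ih =>
        intro h
        simp only [List.foldl, List.map]
        rw [pv_cell_eq schedule entity_label hnd se.1 se.2 n h, ih, pv_join_cons, String.append_assoc]
    rw [hfold]
    simp [String.append_assoc]
  induction tr generalizing s0 with
  | nil => simp [PySem.Str.join, PySem.Chars.join, List.intercalate]
  | cons se tr ih =>
    simp only [List.foldl, List.map]
    rw [hstep, ih, pv_join_cons, String.append_assoc]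

-- A's day-header loop, evaluated
theorem pv_header_eq (s : String) :
    (PySem.List.pyRange 0 5 1).foldl (fun h n => h ++ ("<th>" ++ pvDayNames.getD n "" ++ "</th>\n")) s
      = s ++ PySem.Str.join ""
          (["Dimanche", "Lundi", "Mardi", "Mercredi", "Jeudi"].map (fun n => "<th>" ++ n ++ "</th>\n")) := by
  rw [pv_foldl_join]
  congr 1

-- ===== VERDICT (by name: the statement is the Claim_ definition above) =====
theorem build_timetable_html_py_spec : Claim_equal_build_timetable_html_py := by
  intro title schedule entity_label hdom hpre
  unfold Spec_build_timetable_html_py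
  unfold build_timetable_html_py build_timetable_html_py_alt
  simp only []
  rw [pv_set_eq, PySem.Set.update_empty]
  by_cases hnil : PySem.List.sorted2 (PySem.Set.ofList (schedule.flatMap (fun p => p.2.map pvKey)))
      (fun x => x.1) (fun x => x.2) false = []
  · rw [if_pos hnil, if_pos hnil]
  · rw [if_neg hnil, if_neg hnil, pv_header_eq, pv_rows_eq schedule entity_label hpre.2]
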